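-- pv_equiv track=rewrite | github.com/bobbrom/MemoryManagment | python/background.py | getAmounts
-- ===== SOURCE A (Python) =====
-- def getAmounts(bytesToDo):
--     amountsMade = []
--     for i in range(4):
--         bytesFree = bytesToDo % 1024**(i+1)
--         amount = bytesFree // 1024**(i)
--         bytesToDo -= bytesFree
--         amountsMade.append(int(amount))
--     return amountsMade
-- ===== SOURCE B (Python) =====
-- def _digits(n, k):
--     # peel the lowest base digit and recurse on the quotient
--     if k == 0:
--         return []
--     q, r = divmod(n, 1024)
--     return [int(r)] + _digits(q, k - 1)
--
-- def getAmounts(bytesToDo):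
--     return _digits(bytesToDo, 4)
-- ===== Notes on version B (the rewrite author's own statement) =====
-- stated objective: simpler
-- what changed: Replaces A's loop over growing powers of the base, which mods by the next power, floor-divides, and subtracts the consumed part out of a mutated running total, with a recursive divmod chain that repeatedly peels the lowest base digit off the quotient; no power table and no mutable accumulator remain.
import Mathlib
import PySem

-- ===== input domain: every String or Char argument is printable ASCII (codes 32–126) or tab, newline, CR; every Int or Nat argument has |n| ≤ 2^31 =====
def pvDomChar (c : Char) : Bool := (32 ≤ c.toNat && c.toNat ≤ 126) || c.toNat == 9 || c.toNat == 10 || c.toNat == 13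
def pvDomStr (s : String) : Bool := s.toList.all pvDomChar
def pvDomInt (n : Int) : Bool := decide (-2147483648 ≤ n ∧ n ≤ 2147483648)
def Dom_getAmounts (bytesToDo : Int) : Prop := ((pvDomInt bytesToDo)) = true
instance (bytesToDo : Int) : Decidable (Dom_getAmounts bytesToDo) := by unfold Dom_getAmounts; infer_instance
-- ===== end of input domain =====

-- B replaces A's power-table loop with a mutating remainder by a recursive divmod chain
-- peeling one base digit at a time; same return values (objective: simpler).

-- ===== PORT A =====
def getAmounts (bytesToDo : Int) : List Int :=
  (((PySem.List.pyRange 0 4 1).foldl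
      (fun (st : Int × List Int) i =>
        let bytesFree := PySem.Int.mod st.1 (1024 ^ (i + 1).toNat)
        let amount := PySem.Int.floordiv bytesFree (1024 ^ i.toNat)
        (st.1 - bytesFree, st.2 ++ [amount]))
      (bytesToDo, []))).2

-- ===== PORT B =====
-- helper _digits from Source B: recursion on k, divmod by the base each step
def pvDigits (n : Int) (k : Nat) : List Int :=
  match k with
  | 0 => []
  | k + 1 =>
    let q := PySem.Int.floordiv n 1024
    let r := PySem.Int.mod n 1024
    r :: pvDigits q k

def getAmounts_alt (bytesToDo : Int) : List Int :=
  pvDigits bytesToDo 4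

-- ===== PRECONDITION & SPEC =====
def Spec_getAmounts (bytesToDo : Int) (out : List Int) : Prop := out = getAmounts_alt bytesToDo
instance (bytesToDo : Int) (out : List Int) : Decidable (Spec_getAmounts bytesToDo out) := by unfold Spec_getAmounts; infer_instance

-- ===== CLAIM (what is proved, stated in full; the proofs are below) =====
def Claim_equal_getAmounts : Prop := ∀ (bytesToDo : Int), Dom_getAmounts bytesToDo → Spec_getAmounts bytesToDo (getAmounts bytesToDo)

-- ===== LEMMAS AND PROOFS =====

-- ===== VERDICT (by name: the statement is the Claim_ definition above) =====
theorem getAmounts_spec : Claim_equal_getAmounts := by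
  intro x _
  unfold Spec_getAmounts getAmounts getAmounts_alt
  simp [PySem.List.pyRange, pvDigits, PySem.Int.floordiv_eq_ediv_of_pos, PySem.Int.mod_eq_emod_of_pos,
    List.range_succ]
  omega
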